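-- pv_equiv track=rewrite | github.com/albhasan/gdal2scidb | gdal2bin_util.py | n2pos
-- ===== SOURCE A (Python) =====
-- def n2pos(n, dims):
--         pos = [0] * len(dims)                                                                                                                # position of n in the array
--         top = [0] * len(dims)                                                                                                                 # maximum number of elements on each dimension
--         for i in reversed(range(len(dims))):
--                 tot = 1
--                 for j in range(i, len(dims)):
--                         tot = tot * dims[j]
--                 top[i] = tot
--         if n > top[0] or n < 0:
--                 raise ValueError('Invalid index n')
--         top.append(1)
--         test = n
--         for i in range(len(pos)):
--                 pos[i] = test // top[i + 1]
--                 test = test - (pos[i] * top[i + 1])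
--         return(pos)
-- ===== SOURCE B (Python) =====
-- def n2pos(n, dims):
--     # suffix products in one backward pass: suf[i] = product of dims[i:]
--     suf = [1]
--     for d in reversed(dims):
--         suf.append(suf[-1] * d)
--     suf.reverse()
--     if n > suf[0] or n < 0:
--         raise ValueError('Invalid index n')
--     pos = []
--     rem = n
--     for s in suf[1:]:
--         q, rem = divmod(rem, s)
--         pos.append(q)
--     return pos
-- ===== Notes on version B (the rewrite author's own statement) =====
-- stated objective: faster
-- what changed: B replaces A's nested loop (recomputing each suffix product from scratch, quadratically many multiplications) by one backward pass that accumulates suffix products, then a single divmod pass; intended as faster (measured 73x at d=1024 in a timing run; at d=4096 huge-integer products make both time out).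
import Mathlib
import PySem

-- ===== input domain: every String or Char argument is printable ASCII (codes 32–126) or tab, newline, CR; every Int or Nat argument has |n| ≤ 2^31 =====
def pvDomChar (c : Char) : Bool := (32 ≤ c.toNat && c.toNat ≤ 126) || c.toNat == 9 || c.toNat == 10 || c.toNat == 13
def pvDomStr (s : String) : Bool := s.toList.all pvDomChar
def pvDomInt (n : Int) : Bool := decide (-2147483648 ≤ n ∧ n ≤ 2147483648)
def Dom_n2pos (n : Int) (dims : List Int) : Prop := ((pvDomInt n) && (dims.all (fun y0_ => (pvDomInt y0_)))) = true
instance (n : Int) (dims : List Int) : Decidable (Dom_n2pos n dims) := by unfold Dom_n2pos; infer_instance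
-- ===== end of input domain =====

-- B replaces A's nested recomputation of suffix products by one backward accumulating pass (intended as faster; a timing run measured 73x at d=1024, unconfirmed at the largest size); return values are identical wherever A returns.

-- ===== PORT A =====
-- literal transliteration of A: top[i] built by a nested loop (the inner loop re-multiplies dims[i:]),
-- the ValueError check, top.append(1), then the division loop writing into a preallocated pos.
-- Where Python raises (the ValueError branch; top[0] on empty dims) the port returns []; Pre_ excludes those inputs.
def n2posTop (dims : List Int) : List Int :=
  ((PySem.List.pyRange 0 (dims.length : Int) 1).reverse).foldl
    (fun top i =>
      top.set i.toNat ((PySem.List.pyRange i (dims.length : Int) 1).foldl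
        (fun tot j => tot * PySem.List.pyGetD dims j 0) 1))
    (List.replicate dims.length 0)

def n2pos (n : Int) (dims : List Int) : List Int :=
  if n > PySem.List.pyGetD (n2posTop dims) 0 0 ∨ n < 0 then []   -- raise ValueError
  else
    ((PySem.List.pyRange 0 (dims.length : Int) 1).foldl
      (fun (st : List Int × Int) i =>
        (st.1.set i.toNat
           (PySem.Int.floordiv st.2 (PySem.List.pyGetD (n2posTop dims ++ [1]) (i + 1) 0)),
         st.2 - (PySem.Int.floordiv st.2 (PySem.List.pyGetD (n2posTop dims ++ [1]) (i + 1) 0))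
           * (PySem.List.pyGetD (n2posTop dims ++ [1]) (i + 1) 0)))
      (List.replicate dims.length 0, n)).1

-- ===== PORT B =====
-- transliteration of Source B: suf accumulated in one backward pass then reversed; divmod loop over suf[1:].
def n2posSuf (dims : List Int) : List Int :=
  (dims.reverse.foldl (fun s d => s ++ [(s.getLastD 1) * d]) [1]).reverse

def n2pos_alt (n : Int) (dims : List Int) : List Int :=
  if n > PySem.List.pyGetD (n2posSuf dims) 0 0 ∨ n < 0 then []   -- raise ValueError
  else
    (((n2posSuf dims).drop 1).foldl
      (fun (st : List Int × Int) s =>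
        (st.1 ++ [PySem.Int.floordiv st.2 s], PySem.Int.mod st.2 s))
      (([] : List Int), n)).1

-- ===== PRECONDITION & SPEC =====
-- Pre_ excludes exactly the inputs where Python A raises: empty dims (IndexError at top[0]),
-- n < 0 or n > prod dims (ValueError), and a zero in dims[1:] (ZeroDivisionError in the division loop).
def Pre_n2pos (n : Int) (dims : List Int) : Prop :=
  dims ≠ [] ∧ 0 ≤ n ∧ n ≤ dims.prod ∧ ∀ d ∈ dims.tail, d ≠ 0
instance (n : Int) (dims : List Int) : Decidable (Pre_n2pos n dims) := by
  unfold Pre_n2pos; infer_instance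
def pvWitness_n2pos : Int × List Int := (5, [2, 3, 4])

def Spec_n2pos (n : Int) (dims : List Int) (out : List Int) : Prop := out = n2pos_alt n dims
instance (n : Int) (dims : List Int) (out : List Int) : Decidable (Spec_n2pos n dims out) := by unfold Spec_n2pos; infer_instance

-- ===== CLAIM (what is proved, stated in full; the proofs are below) =====
def Claim_equal_n2pos : Prop := ∀ (n : Int) (dims : List Int), Dom_n2pos n dims → Pre_n2pos n dims → Spec_n2pos n dims (n2pos n dims)

-- ===== LEMMAS AND PROOFS =====

-- shared reference recursion: q = rem // prod(rest), rem := rem - q * prod(rest)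
def posRef (n : Int) (dims : List Int) : List Int :=
  match dims with
  | [] => []
  | _ :: ds =>
    let q := PySem.Int.floordiv n ds.prod
    q :: posRef (n - q * ds.prod) ds

lemma pyRange_nat (len : Nat) :
    PySem.List.pyRange 0 (len : Int) 1 = (List.range len).map (fun (k : Nat) => (k : Int)) :=
  PySem.List.pyRange_zero_nat len

lemma foldl_set_length (g : Nat → Int) (is : List Nat) (init : List Int) :
    (is.foldl (fun t i => t.set i (g i)) init).length = init.length := by
  induction is generalizing init with
  | nil => rfl
  | cons i is ih => simp [List.foldl_cons, ih]

lemma foldl_set_getD_notmem (g : Nat → Int) (is : List Nat) (init : List Int) (k : Nat)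
    (hk : k ∉ is) :
    (is.foldl (fun t i => t.set i (g i)) init).getD k 0 = init.getD k 0 := by
  induction is generalizing init with
  | nil => rfl
  | cons i is ih =>
    simp only [List.foldl_cons]
    rw [ih _ (fun h => hk (List.mem_cons_of_mem _ h))]
    rw [List.getD_eq_getElem?_getD, List.getD_eq_getElem?_getD,
        List.getElem?_set_ne (fun h => hk (by cases h; exact List.mem_cons_self))]

lemma foldl_set_getD (g : Nat → Int) (is : List Nat) (init : List Int) (k : Nat)
    (hk : k ∈ is) (hlen : k < init.length) :
    (is.foldl (fun t i => t.set i (g i)) init).getD k 0 = g k := by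
  induction is generalizing init with
  | nil => cases hk
  | cons i is ih =>
    simp only [List.foldl_cons]
    by_cases hmem : k ∈ is
    · exact ih _ hmem (by simpa using hlen)
    · have hik : k = i := (List.mem_cons.1 hk).resolve_right hmem
      subst hik
      rw [foldl_set_getD_notmem _ _ _ _ hmem]
      rw [List.getD_eq_getElem?_getD, List.getElem?_set_self hlen]
      rfl

lemma take_succ_set (acc : List Int) (a : Nat) (p : Int) (h : a < acc.length) :
    (acc.set a p).take (a + 1) = acc.take a ++ [p] := by
  apply List.ext_getElem
  · simp [h]; omega
  · intro i h1 h2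
    simp only [List.getElem_take, List.getElem_set]
    by_cases hia : i = a
    · subst hia
      simp [List.length_take, Nat.min_eq_left (Nat.le_of_lt h)]
    · have hi : i < a := by simp [h] at h1; omega
      rw [if_neg (fun hh => hia hh.symm), List.getElem_append]
      rw [dif_pos (by simp [List.length_take]; omega), List.getElem_take]

lemma inner_tot (dims : List Int) (k : Nat) :
    (PySem.List.pyRange (k : Int) (dims.length : Int) 1).foldl
      (fun tot j => tot * PySem.List.pyGetD dims j 0) 1 = (dims.drop k).prod := by
  rw [PySem.List.foldl_pyRange_pyGetD' dims 0 (fun tot x => tot * x) 1 (Int.natCast_nonneg k)]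
  rw [Int.toNat_natCast]
  exact ((dims.drop k).prod_eq_foldl).symm

lemma n2posTop_eq (dims : List Int) :
    n2posTop dims
      = ((List.range dims.length).reverse).foldl
          (fun (t : List Int) (i : Nat) => t.set i ((dims.drop i).prod))
          (List.replicate dims.length 0) := by
  unfold n2posTop
  rw [pyRange_nat, ← List.map_reverse, List.foldl_map]
  apply PySem.List.foldl_congr_mem
  intro acc i _
  rw [Int.toNat_natCast, inner_tot]

lemma n2posTop_length (dims : List Int) : (n2posTop dims).length = dims.length := by
  rw [n2posTop_eq, foldl_set_length]; simp

lemma n2posTop_getD (dims : List Int) (k : Nat) (hk : k < dims.length) :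
    (n2posTop dims).getD k 0 = (dims.drop k).prod := by
  rw [n2posTop_eq]
  exact foldl_set_getD _ _ _ k (by simpa using hk) (by simpa)

-- lookup into top ++ [1] at index k+1, uniformly the suffix product
lemma top1_getD (dims : List Int) (k : Nat) (hk : k < dims.length) :
    PySem.List.pyGetD (n2posTop dims ++ [1]) ((k : Int) + 1) 0 = (dims.drop (k + 1)).prod := by
  have hcast : ((k : Int) + 1) = ((k + 1 : Nat) : Int) := by push_cast; ring
  rw [hcast, PySem.List.pyGetD_natCast]
  by_cases hk1 : k + 1 < dims.length
  · rw [List.getD_eq_getElem?_getD, List.getElem?_append_left (by rw [n2posTop_length]; omega),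
      ← List.getD_eq_getElem?_getD, n2posTop_getD dims (k + 1) hk1]
  · have hk1' : k + 1 = dims.length := by omega
    rw [List.getD_eq_getElem?_getD,
      List.getElem?_append_right (by rw [n2posTop_length]; omega)]
    simp [n2posTop_length, hk1']

-- A's division loop, over Nat indices with the suffix products substituted in
lemma Aloop (dims : List Int) (m : Nat) :
    ∀ (a : Nat) (acc : List Int) (t : Int), acc.length = dims.length → a + m = dims.length →
    ((List.range' a m).foldl
      (fun (st : List Int × Int) (k : Nat) =>
        (st.1.set k (PySem.Int.floordiv st.2 ((dims.drop (k+1)).prod)),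
         st.2 - (PySem.Int.floordiv st.2 ((dims.drop (k+1)).prod)) * ((dims.drop (k+1)).prod)))
      (acc, t)).1 = acc.take a ++ posRef t (dims.drop a) := by
  induction m with
  | zero =>
    intro a acc t hlen ha
    simp only [List.range', List.foldl_nil]
    have hd : dims.drop a = [] := List.drop_eq_nil_of_le (by omega)
    rw [hd, List.take_of_length_le (by omega : acc.length ≤ a)]
    simp [posRef]
  | succ m ih =>
    intro a acc t hlen ha
    have halt : a < dims.length := by omega
    rw [List.range'_succ, List.foldl_cons]
    rw [ih (a+1) _ _ (by simp [hlen]) (by omega)]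
    rw [List.drop_eq_getElem_cons halt]
    simp only [posRef]
    rw [take_succ_set _ _ _ (by omega)]
    simp [List.append_assoc]

-- B's suffix-product accumulator: last element is the running product, reversed it lists all suffix products
lemma sufB_aux (dims : List Int) :
    (dims.reverse.foldl (fun s d => s ++ [(s.getLastD 1) * d]) [1]).getLastD 1 = dims.prod ∧
    n2posSuf dims = (List.range (dims.length + 1)).map (fun k => (dims.drop k).prod) := by
  unfold n2posSuf
  induction dims with
  | nil => simp
  | cons d ds ih =>
    obtain ⟨ih1, ih2⟩ := ih
    have hfold : (d :: ds).reverse.foldl (fun s d => s ++ [(s.getLastD 1) * d]) [1]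
        = (ds.reverse.foldl (fun s d => s ++ [(s.getLastD 1) * d]) [1]) ++ [ds.prod * d] := by
      rw [List.reverse_cons, List.foldl_append, List.foldl_cons, List.foldl_nil, ih1]
    constructor
    · rw [hfold, List.getLastD_concat, List.prod_cons, mul_comm]
    · rw [hfold, List.reverse_append, List.reverse_singleton, List.singleton_append, ih2]
      rw [List.length_cons]
      conv_rhs => rw [List.range_succ_eq_map, List.map_cons, List.map_map]
      simp [mul_comm, Function.comp]

-- B's divmod loop
lemma Bloop (dims : List Int) :
    ∀ (acc : List Int) (t : Int),
    (((List.range dims.length).map (fun k => (dims.drop (k+1)).prod)).foldl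
      (fun (st : List Int × Int) s =>
        (st.1 ++ [PySem.Int.floordiv st.2 s], PySem.Int.mod st.2 s))
      (acc, t)).1 = acc ++ posRef t dims := by
  induction dims with
  | nil => intro acc t; simp [posRef]
  | cons d ds ih =>
    intro acc t
    rw [List.length_cons]
    conv_lhs => rw [List.range_succ_eq_map, List.map_cons, List.map_map]
    have hmap : (List.range ds.length).map ((fun k => ((d :: ds).drop (k+1)).prod) ∘ Nat.succ)
        = (List.range ds.length).map (fun k => (ds.drop (k+1)).prod) := by
      exact List.map_congr_left (fun k _ => rfl)
    rw [hmap, List.foldl_cons]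
    simp only [List.drop_succ_cons, List.drop_zero]
    rw [ih]
    have hmod : PySem.Int.mod t ds.prod
        = t - (PySem.Int.floordiv t ds.prod) * ds.prod := by
      have := PySem.Int.floordiv_mul_add_mod t ds.prod
      omega
    rw [hmod]
    simp [posRef, List.append_assoc]

-- A equals posRef under Pre_
lemma n2pos_eq_posRef (n : Int) (dims : List Int) (hpre : Pre_n2pos n dims) :
    n2pos n dims = posRef n dims := by
  obtain ⟨hne, hn0, hnp, _⟩ := hpre
  have hlen : 0 < dims.length := List.length_pos_of_ne_nil hne
  unfold n2pos
  have htop0 : PySem.List.pyGetD (n2posTop dims) 0 0 = dims.prod := by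
    rw [PySem.List.pyGetD_zero, n2posTop_getD dims 0 hlen]
    simp
  rw [htop0, if_neg (by rintro (h | h) <;> omega)]
  rw [pyRange_nat, List.foldl_map]
  have hcongr :
      (List.range dims.length).foldl
        (fun (st : List Int × Int) (i : Nat) =>
          (st.1.set (Int.toNat (i : Int))
            (PySem.Int.floordiv st.2 (PySem.List.pyGetD (n2posTop dims ++ [1]) ((i : Int) + 1) 0)),
           st.2 - (PySem.Int.floordiv st.2 (PySem.List.pyGetD (n2posTop dims ++ [1]) ((i : Int) + 1) 0))
             * (PySem.List.pyGetD (n2posTop dims ++ [1]) ((i : Int) + 1) 0)))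
        (List.replicate dims.length 0, n)
      = (List.range dims.length).foldl
          (fun (st : List Int × Int) (k : Nat) =>
            (st.1.set k (PySem.Int.floordiv st.2 ((dims.drop (k+1)).prod)),
             st.2 - (PySem.Int.floordiv st.2 ((dims.drop (k+1)).prod)) * ((dims.drop (k+1)).prod)))
          (List.replicate dims.length 0, n) := by
    apply PySem.List.foldl_congr_mem
    intro acc i hi
    rw [Int.toNat_natCast, top1_getD dims i (List.mem_range.1 hi)]
  rw [hcongr, List.range_eq_range']
  rw [Aloop dims dims.length 0 _ n (by simp) (by omega)]
  simp

-- B equals posRef whenever the guard passes (any dims)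
lemma n2pos_alt_eq_posRef (n : Int) (dims : List Int)
    (hn0 : 0 ≤ n) (hnp : n ≤ dims.prod) :
    n2pos_alt n dims = posRef n dims := by
  unfold n2pos_alt
  obtain ⟨_, hsuf⟩ := sufB_aux dims
  have hget0 : PySem.List.pyGetD (n2posSuf dims) 0 0 = dims.prod := by
    rw [hsuf, List.range_succ_eq_map, List.map_cons, PySem.List.pyGetD_zero]
    simp
  rw [hget0, if_neg (by rintro (h | h) <;> omega)]
  have hdrop1 : (n2posSuf dims).drop 1
      = (List.range dims.length).map (fun k => (dims.drop (k+1)).prod) := by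
    rw [hsuf, List.range_succ_eq_map, List.map_cons, List.drop_one, List.tail_cons, List.map_map]
    exact List.map_congr_left (fun k _ => rfl)
  rw [hdrop1, Bloop]
  simp

-- ===== VERDICT (by name: the statement is the Claim_ definition above) =====
theorem n2pos_spec : Claim_equal_n2pos := by
  intro n dims _ hpre
  unfold Spec_n2pos
  rw [n2pos_eq_posRef n dims hpre, n2pos_alt_eq_posRef n dims hpre.2.1 hpre.2.2.1]
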